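-- pv_equiv track=rewrite | github.com/itsShrizon/job-application-agent | app/core/llm_chains.py | _parse_cv_sections
-- ===== SOURCE A (Python) =====
-- def _parse_cv_sections(raw: str) -> dict:
--     sections = {}
--     current_key = None
--     current_lines = []
--
--     for line in raw.split("\n"):
--         stripped = line.strip()
--         if stripped.startswith("[") and stripped.endswith("]"):
--             if current_key:
--                 sections[current_key] = "\n".join(current_lines).strip()
--             current_key = stripped[1:-1].lower()
--             current_lines = []
--         else:
--             current_lines.append(line)
--
--     if current_key:
--         sections[current_key] = "\n".join(current_lines).strip()
--
--     return {
--         "summary": sections.get("summary", ""),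
--         "skills": sections.get("skills", ""),
--         "experience": sections.get("experience", ""),
--         "projects": sections.get("projects", ""),
--         "education": sections.get("education", ""),
--         "certifications": sections.get("certifications", ""),
--     }
-- ===== SOURCE B (Python) =====
-- def _is_header(line: str) -> bool:
--     s = line.strip()
--     return s.startswith("[") and s.endswith("]")
--
--
-- def _parse_cv_sections(raw: str) -> dict:
--     # Two-phase segmentation: jump from header line to header line by index,
--     # slicing out each body block, instead of a stateful line-by-line accumulator.
--     lines = raw.split("\n")
--     n = len(lines)
--     sections = {}
--     i = 0
--     while i < n and not _is_header(lines[i]):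
--         i += 1  # discard preamble before the first header
--     while i < n:
--         key = lines[i].strip()[1:-1].lower()
--         j = i + 1
--         while j < n and not _is_header(lines[j]):
--             j += 1
--         if key:
--             sections[key] = "\n".join(lines[i + 1:j]).strip()
--         i = j
--     return {
--         "summary": sections.get("summary", ""),
--         "skills": sections.get("skills", ""),
--         "experience": sections.get("experience", ""),
--         "projects": sections.get("projects", ""),
--         "education": sections.get("education", ""),
--         "certifications": sections.get("certifications", ""),
--     }
-- ===== Notes on version B (the rewrite author's own statement) =====
-- stated objective: alternative
-- what changed: Replaces A's stateful accumulator loop (current_key/current_lines carried across every line) with two-phase index segmentation: skip the preamble, then jump from header to header, slicing each body block out of the line list directly.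
import Mathlib
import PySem

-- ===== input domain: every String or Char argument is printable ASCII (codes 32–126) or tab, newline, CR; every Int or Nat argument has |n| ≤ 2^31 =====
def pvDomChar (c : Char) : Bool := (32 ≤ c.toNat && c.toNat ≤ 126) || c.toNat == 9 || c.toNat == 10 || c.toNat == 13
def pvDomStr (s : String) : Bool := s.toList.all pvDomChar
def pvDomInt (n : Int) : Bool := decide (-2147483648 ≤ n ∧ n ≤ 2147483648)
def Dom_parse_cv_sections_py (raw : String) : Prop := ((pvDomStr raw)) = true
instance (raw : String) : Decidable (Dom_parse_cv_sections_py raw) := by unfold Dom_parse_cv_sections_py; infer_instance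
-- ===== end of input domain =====

-- B replaces A's stateful accumulator loop with index-based header-to-header segmentation; objective: alternative (same cost).

-- ===== PORT A =====
-- 'if current_key: sections[current_key] = "\n".join(current_lines).strip()' (appears twice in A)
def pvSaveA (d : PySem.Dict String String) (ck : Option String) (cls : List String) :
    PySem.Dict String String :=
  match ck with
  | some k => if k ≠ "" then d.insert k (PySem.Str.strip (PySem.Str.join "\n" cls)) else d
  | none => d

-- one iteration of A's for-loop; state = (sections, current_key, current_lines)
def pvStepA (st : PySem.Dict String String × Option String × List String) (line : String) :
    PySem.Dict String String × Option String × List String :=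
  let stripped := PySem.Str.strip line
  if PySem.Str.startswith stripped "[" && PySem.Str.endswith stripped "]" then
    (pvSaveA st.1 st.2.1 st.2.2,
     some (PySem.Str.lower (PySem.Str.slice stripped (some 1) (some (-1)))), [])
  else
    (st.1, st.2.1, st.2.2 ++ [line])

def parse_cv_sections_py (raw : String) : List (String × String) :=
  let st := ((PySem.Str.split? raw "\n").getD []).foldl pvStepA (PySem.Dict.empty, none, [])
  let sections := pvSaveA st.1 st.2.1 st.2.2
  [("summary", sections.getD "summary" ""),
   ("skills", sections.getD "skills" ""),
   ("experience", sections.getD "experience" ""),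
   ("projects", sections.getD "projects" ""),
   ("education", sections.getD "education" ""),
   ("certifications", sections.getD "certifications" "")]

-- ===== PORT B =====
def pvIsHeader (line : String) : Bool :=
  let s := PySem.Str.strip line
  PySem.Str.startswith s "[" && PySem.Str.endswith s "]"

-- 'while _ < n and not _is_header(lines[_]): _ += 1' (both inner scans of B)
def pvSkip (lines : List String) (i : Nat) : Nat :=
  if h : i < lines.length then
    if pvIsHeader lines[i] then i else pvSkip lines (i + 1)
  else i
termination_by lines.length - i

theorem pvSkip_ge (lines : List String) (i : Nat) : i ≤ pvSkip lines i := by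
  unfold pvSkip
  split
  · split
    · exact Nat.le_refl i
    · have := pvSkip_ge lines (i + 1); omega
  · exact Nat.le_refl i
termination_by lines.length - i

-- B's outer while loop: at each header index, slice out the body block up to the next header
def pvLoopB (lines : List String) (i : Nat) (d : PySem.Dict String String) :
    PySem.Dict String String :=
  if h : i < lines.length then
    let key := PySem.Str.lower (PySem.Str.slice (PySem.Str.strip lines[i]) (some 1) (some (-1)))
    let j := pvSkip lines (i + 1)
    let d' := if key ≠ "" then
        d.insert key (PySem.Str.strip (PySem.Str.join "\n"
          (PySem.List.slice lines (some ((i + 1 : Nat) : Int)) (some ((j : Nat) : Int)))))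
      else d
    pvLoopB lines j d'
  else d
termination_by lines.length - i
decreasing_by have := pvSkip_ge lines (i + 1); omega

def parse_cv_sections_py_alt (raw : String) : List (String × String) :=
  let lines := (PySem.Str.split? raw "\n").getD []
  let sections := pvLoopB lines (pvSkip lines 0) PySem.Dict.empty
  [("summary", sections.getD "summary" ""),
   ("skills", sections.getD "skills" ""),
   ("experience", sections.getD "experience" ""),
   ("projects", sections.getD "projects" ""),
   ("education", sections.getD "education" ""),
   ("certifications", sections.getD "certifications" "")]

-- ===== PRECONDITION & SPEC =====
def Spec_parse_cv_sections_py (raw : String) (out : List (String × String)) : Prop := out = parse_cv_sections_py_alt raw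
instance (raw : String) (out : List (String × String)) : Decidable (Spec_parse_cv_sections_py raw out) := by unfold Spec_parse_cv_sections_py; infer_instance

-- ===== CLAIM (what is proved, stated in full; the proofs are below) =====
def Claim_equal_parse_cv_sections_py : Prop := ∀ (raw : String), Dom_parse_cv_sections_py raw → Spec_parse_cv_sections_py raw (parse_cv_sections_py raw)

-- ===== LEMMAS AND PROOFS =====

-- general: dropWhile is drop of the takeWhile length (no library lemma closes this)
theorem pvDropWhile_eq_drop (p : String → Bool) (l : List String) :
    l.dropWhile p = l.drop (l.takeWhile p).length := by
  induction l with
  | nil => simp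
  | cons a l ih => by_cases h : p a <;> simp [h, ih]

-- pvSkip lands exactly past the non-header prefix
theorem pvSkip_eq (lines : List String) (i : Nat) :
    pvSkip lines i = i + ((lines.drop i).takeWhile (fun l => !pvIsHeader l)).length := by
  unfold pvSkip
  split
  · next h =>
    rw [List.drop_eq_getElem_cons h, List.takeWhile_cons]
    split
    · next hh => simp [hh]
    · next hh =>
      rw [pvSkip_eq lines (i + 1)]
      simp only [hh, Bool.not_false, if_pos, List.length_cons]
      omega
  · next h =>
    have : lines.drop i = [] := List.drop_eq_nil_of_le (by omega)
    simp [this]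
termination_by lines.length - i

-- A's fold walks through a block of non-header lines by appending them to current_lines
theorem foldA_nonheader (pre : List String) (hpre : ∀ l ∈ pre, pvIsHeader l = false) :
    ∀ (d : PySem.Dict String String) (ck : Option String) (acc : List String),
    List.foldl pvStepA (d, ck, acc) pre = (d, ck, acc ++ pre) := by
  induction pre with
  | nil => intro d ck acc; simp
  | cons l rest ih =>
    intro d ck acc
    have hl : pvIsHeader l = false := hpre l (by simp)
    have hstep : pvStepA (d, ck, acc) l = (d, ck, acc ++ [l]) := by
      simp only [pvStepA]
      rw [show (PySem.Str.startswith (PySem.Str.strip l) "[" &&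
            PySem.Str.endswith (PySem.Str.strip l) "]") = pvIsHeader l from rfl, hl]
      simp
    rw [List.foldl_cons, hstep, ih (fun x hx => hpre x (by simp [hx]))]
    simp

-- main correspondence: A's fold-and-finish from any state equals B's segment loop
theorem mainA_eq_loopB (lines : List String) (i : Nat) (d : PySem.Dict String String)
    (ck : Option String) (acc : List String) :
    pvSaveA (List.foldl pvStepA (d, ck, acc) (lines.drop i)).1
        (List.foldl pvStepA (d, ck, acc) (lines.drop i)).2.1
        (List.foldl pvStepA (d, ck, acc) (lines.drop i)).2.2 =
    pvLoopB lines (pvSkip lines i)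
      (pvSaveA d ck (acc ++ (lines.drop i).takeWhile (fun l => !pvIsHeader l))) := by
  have hpre_mem : ∀ l ∈ (lines.drop i).takeWhile (fun l => !pvIsHeader l), pvIsHeader l = false := by
    intro l hl
    have := List.mem_takeWhile_imp hl
    simpa using this
  have hskip : pvSkip lines i =
      i + ((lines.drop i).takeWhile (fun l => !pvIsHeader l)).length := pvSkip_eq lines i
  have hdw : (lines.drop i).dropWhile (fun l => !pvIsHeader l) = lines.drop (pvSkip lines i) := by
    rw [pvDropWhile_eq_drop, List.drop_drop, hskip]
  have hdecomp : lines.drop i =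
      (lines.drop i).takeWhile (fun l => !pvIsHeader l) ++ lines.drop (pvSkip lines i) := by
    conv_lhs => rw [← List.takeWhile_append_dropWhile
      (p := fun l => !pvIsHeader l) (l := lines.drop i)]
    rw [hdw]
  by_cases hi : pvSkip lines i < lines.length
  · -- stopped on a header line
    have hcons : (lines.drop i).dropWhile (fun l => !pvIsHeader l) =
        (lines[pvSkip lines i]'hi) :: lines.drop (pvSkip lines i + 1) :=
      hdw.trans (List.drop_eq_getElem_cons hi)
    have hne : (lines.drop i).dropWhile (fun l => !pvIsHeader l) ≠ [] := by
      rw [hcons]; exact List.cons_ne_nil _ _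
    have hh : pvIsHeader (lines[pvSkip lines i]'hi) = true := by
      have h2 := List.head_dropWhile_not (fun l => !pvIsHeader l) hne
      simp only [hcons, List.head_cons] at h2
      simpa using h2
    have hdrop : lines.drop (pvSkip lines i) =
        (lines[pvSkip lines i]'hi) :: lines.drop (pvSkip lines i + 1) :=
      List.drop_eq_getElem_cons hi
    have hstep : pvStepA (d, ck, acc ++ (lines.drop i).takeWhile (fun l => !pvIsHeader l))
        (lines[pvSkip lines i]'hi) =
        (pvSaveA d ck (acc ++ (lines.drop i).takeWhile (fun l => !pvIsHeader l)),
         some (PySem.Str.lower (PySem.Str.slice (PySem.Str.strip (lines[pvSkip lines i]'hi))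
           (some 1) (some (-1)))), []) := by
      simp only [pvStepA]
      rw [show (PySem.Str.startswith (PySem.Str.strip (lines[pvSkip lines i]'hi)) "[" &&
            PySem.Str.endswith (PySem.Str.strip (lines[pvSkip lines i]'hi)) "]") =
            pvIsHeader (lines[pvSkip lines i]'hi) from rfl, hh]
      simp
    have hbody : PySem.List.slice lines (some ((pvSkip lines i + 1 : Nat) : Int))
        (some ((pvSkip lines (pvSkip lines i + 1) : Nat) : Int)) =
        (lines.drop (pvSkip lines i + 1)).takeWhile (fun l => !pvIsHeader l) := by
      rw [PySem.List.slice_natCast, pvSkip_eq lines (pvSkip lines i + 1)]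
      have hpref : (lines.drop (pvSkip lines i + 1)).takeWhile (fun l => !pvIsHeader l) <+:
          lines.drop (pvSkip lines i + 1) := List.takeWhile_prefix _
      rw [Nat.add_sub_cancel_left]
      exact (List.prefix_iff_eq_take.mp hpref).symm
    conv_lhs => rw [hdecomp, List.foldl_append,
      foldA_nonheader _ hpre_mem d ck acc, hdrop, List.foldl_cons, hstep]
    rw [mainA_eq_loopB lines (pvSkip lines i + 1)
      (pvSaveA d ck (acc ++ (lines.drop i).takeWhile (fun l => !pvIsHeader l)))
      (some (PySem.Str.lower (PySem.Str.slice (PySem.Str.strip (lines[pvSkip lines i]'hi))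
        (some 1) (some (-1))))) []]
    conv_rhs => rw [pvLoopB]
    rw [dif_pos hi]
    simp only [pvSaveA, List.nil_append, hbody]
  · -- ran off the end of the list
    have hdrop : lines.drop (pvSkip lines i) = [] := List.drop_eq_nil_of_le (by omega)
    conv_lhs => rw [hdecomp, List.foldl_append,
      foldA_nonheader _ hpre_mem d ck acc, hdrop, List.foldl_nil]
    conv_rhs => rw [pvLoopB]
    rw [dif_neg hi]
termination_by lines.length - i
decreasing_by have := pvSkip_ge lines i; omega

-- ===== VERDICT (by name: the statement is the Claim_ definition above) =====
theorem parse_cv_sections_py_spec : Claim_equal_parse_cv_sections_py := by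
  intro raw _
  unfold Spec_parse_cv_sections_py parse_cv_sections_py parse_cv_sections_py_alt
  have h := mainA_eq_loopB ((PySem.Str.split? raw "\n").getD []) 0 PySem.Dict.empty none []
  have e : ∀ x, pvSaveA PySem.Dict.empty none x = PySem.Dict.empty := fun _ => rfl
  simp only [List.drop_zero] at h
  rw [e] at h
  simp only [h]
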